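-- pv_equiv track=rewrite | github.com/TruongLangQuan/idk-python | ontap/pumpks/pumpks.py | diem
-- ===== SOURCE A (Python) =====
-- def diem(arr):
--     result = 0
--     temp = 0
--
--     for i in arr:
--         for val in i:
--             temp += val
--             if temp >= 200:
--                 result = temp
--                 return result
--     return result
-- ===== SOURCE B (Python) =====
-- def diem(arr):
--     xs = [v for row in arr for v in row]
--     if not xs:
--         return 0
--
--     def solve(lo, hi, off):
--         # returns (first running total >= 200 in xs[lo:hi] starting from off, or None;
--         #          off + sum(xs[lo:hi]))
--         if hi - lo == 1:
--             t = off + xs[lo]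
--             return (t if t >= 200 else None, t)
--         mid = (lo + hi) // 2
--         c1, t1 = solve(lo, mid, off)
--         if c1 is not None:
--             return (c1, t1)
--         return solve(mid, hi, t1)
--
--     c, _ = solve(0, len(xs), 0)
--     return 0 if c is None else c
-- ===== Notes on version B (the rewrite author's own statement) =====
-- stated objective: alternative
-- what changed: Replaced A's nested imperative loops with mutable counter and early return by a divide-and-conquer recursion over the flattened values: each half returns (first running total >= 200, segment total), and halves are combined by threading the left total as the right half's offset.
import Mathlib
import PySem

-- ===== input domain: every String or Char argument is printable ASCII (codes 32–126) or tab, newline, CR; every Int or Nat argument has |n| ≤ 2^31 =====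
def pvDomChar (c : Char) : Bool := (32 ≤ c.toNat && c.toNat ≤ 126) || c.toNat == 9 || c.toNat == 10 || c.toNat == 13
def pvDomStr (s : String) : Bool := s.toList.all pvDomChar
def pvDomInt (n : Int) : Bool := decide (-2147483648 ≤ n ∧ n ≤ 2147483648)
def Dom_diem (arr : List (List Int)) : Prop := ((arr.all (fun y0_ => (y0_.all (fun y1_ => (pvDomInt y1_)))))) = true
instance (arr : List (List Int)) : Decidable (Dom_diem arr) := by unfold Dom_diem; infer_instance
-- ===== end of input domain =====

-- B replaces A's nested loops / mutable counter / early return by a divide-and-conquer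
-- recursion on the flattened values (each half reports its first crossing and its total);
-- a genuinely different decomposition of the same task, same overall cost.

-- ===== PORT A =====
-- inner loop over one row: Sum.inr r = the early `return result`; Sum.inl temp = loop ended
def diemInner (vals : List Int) (temp : Int) : Int ⊕ Int :=
  match vals with
  | [] => Sum.inl temp
  | v :: rest =>
    if temp + v ≥ 200 then Sum.inr (temp + v) else diemInner rest (temp + v)

def diemOuter (arr : List (List Int)) (temp : Int) : Int :=
  match arr with
  | [] => 0       -- result is still 0 here
  | i :: rest =>
    match diemInner i temp with
    | Sum.inr r => r
    | Sum.inl t => diemOuter rest t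

def diem (arr : List (List Int)) : Int := diemOuter arr 0

-- ===== PORT B =====
-- solve on a nonempty segment (here: a nonempty list), starting offset `off`:
-- (first running total ≥ 200 in the segment, or none; off + segment sum)
def diemSolve (xs : List Int) (off : Int) : Option Int × Int :=
  match xs with
  | [] => (none, off)          -- unreachable in B (segments are nonempty); kept for totality
  | [x] => (if off + x ≥ 200 then some (off + x) else none, off + x)
  | x :: y :: rest =>
    let m := (x :: y :: rest).length / 2
    let p := diemSolve ((x :: y :: rest).take m) off
    match p.1 with
    | some r => (some r, p.2)
    | none => diemSolve ((x :: y :: rest).drop m) p.2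
termination_by xs.length
decreasing_by
  · simp; omega
  · simp; omega

def diem_alt (arr : List (List Int)) : Int :=
  match arr.flatten with
  | [] => 0
  | xs => ((diemSolve xs 0).1).getD 0

-- ===== PRECONDITION & SPEC =====
def Spec_diem (arr : List (List Int)) (out : Int) : Prop := out = diem_alt arr
instance (arr : List (List Int)) (out : Int) : Decidable (Spec_diem arr out) := by unfold Spec_diem; infer_instance

-- ===== CLAIM =====
def Claim_equal_diem : Prop := ∀ (arr : List (List Int)), Dom_diem arr → Spec_diem arr (diem arr)

-- ===== LEMMAS AND PROOFS =====

-- running totals of a list starting from acc (proof-only characterisation device)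
def diemAccum (xs : List Int) (acc : Int) : List Int :=
  match xs with
  | [] => []
  | x :: rest => (acc + x) :: diemAccum rest (acc + x)

theorem diemAccum_append (xs ys : List Int) (acc : Int) :
    diemAccum (xs ++ ys) acc = diemAccum xs acc ++ diemAccum ys (acc + xs.sum) := by
  induction xs generalizing acc with
  | nil => simp [diemAccum]
  | cons x rest ih => simp [diemAccum, ih, add_assoc]

-- characterisation of A's inner loop against the running totals of one row
theorem diemInner_char (vals : List Int) (temp : Int) :
    (diemInner vals temp = Sum.inl (temp + vals.sum) ∧
      (diemAccum vals temp).find? (fun s => 200 ≤ s) = none) ∨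
    (∃ r, diemInner vals temp = Sum.inr r ∧
      (diemAccum vals temp).find? (fun s => 200 ≤ s) = some r) := by
  induction vals generalizing temp with
  | nil => left; simp [diemInner, diemAccum]
  | cons v rest ih =>
    by_cases h : temp + v ≥ 200
    · right
      exact ⟨temp + v, by simp [diemInner, h], by simp [diemAccum, h]⟩
    · rcases ih (temp + v) with ⟨h1, h2⟩ | ⟨r, h1, h2⟩
      · left
        constructor
        · simp [diemInner, h, h1]; ring
        · simpa [diemAccum, List.find?, show ¬ (200 ≤ temp + v) from h] using h2
      · right
        exact ⟨r, by simp [diemInner, h, h1],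
          by simpa [diemAccum, List.find?, show ¬ (200 ≤ temp + v) from h] using h2⟩

theorem diemOuter_char (arr : List (List Int)) (temp : Int) :
    diemOuter arr temp = ((diemAccum arr.flatten temp).find? (fun s => 200 ≤ s)).getD 0 := by
  induction arr generalizing temp with
  | nil => simp [diemOuter, diemAccum]
  | cons i rest ih =>
    rcases diemInner_char i temp with ⟨h1, h2⟩ | ⟨r, h1, h2⟩
    · simp [diemOuter, h1, ih, List.flatten, diemAccum_append, List.find?_append, h2]
    · simp [diemOuter, h1, List.flatten, diemAccum_append, List.find?_append, h2]

-- characterisation of B's divide-and-conquer against the same running totals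
theorem diemSolve_char (xs : List Int) (off : Int) :
    (diemSolve xs off).1 = (diemAccum xs off).find? (fun s => 200 ≤ s) ∧
    ((diemSolve xs off).1 = none → (diemSolve xs off).2 = off + xs.sum) := by
  fun_induction diemSolve xs off with
  | case1 off => simp [diemAccum]
  | case2 off x => by_cases h : off + x ≥ 200 <;> simp [diemAccum, h]
  | case3 off x y rest m p r hp ih =>
    have hq : p = diemSolve ((x :: y :: rest).take m) off := rfl
    rw [hq] at hp
    have hsplit := List.take_append_drop m (x :: y :: rest)
    constructor
    · show some r = _
      conv_rhs => rw [← hsplit]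
      rw [diemAccum_append, List.find?_append, ← ih.1, hp]
      rfl
    · intro hc; exact absurd hc (by simp)
  | case4 off x y rest m p hp ihA ihB ihDrop =>
    have hq : p = diemSolve ((x :: y :: rest).take m) off := rfl
    rw [hq] at hp ihDrop ⊢
    have ht : (diemSolve ((x :: y :: rest).take m) off).2
        = off + ((x :: y :: rest).take m).sum := ihA.2 hp
    rw [ht] at ihDrop ⊢
    have hsplit := List.take_append_drop m (x :: y :: rest)
    constructor
    · rw [ihDrop.1]
      conv_rhs => rw [← hsplit]
      rw [diemAccum_append, List.find?_append, ← ihA.1, hp]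
      rfl
    · intro hc
      rw [ihDrop.2 hc, add_assoc, ← List.sum_append, hsplit]

-- ===== VERDICT =====
theorem diem_spec : Claim_equal_diem := by
  intro arr _
  unfold Spec_diem diem diem_alt
  rw [diemOuter_char]
  match h : arr.flatten with
  | [] => simp [diemAccum]
  | x :: xs =>
    show _ = ((diemSolve (x :: xs) 0).1).getD 0
    rw [(diemSolve_char (x :: xs) 0).1]
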